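-- pv_equiv track=rewrite | github.com/Achronus/wep-classifier | functions/tuning.py | get_model_names
-- ===== SOURCE A (Python) =====
-- def get_model_names(model_paths):
--     """
--     Used to obtain the model names from a list of saved models filenames.
--
--     Parameters:
--         model_paths (list) - saved model names as strings
--     """
--     model_names = []
--
--     # Set model names
--     for item in model_paths:
--         model_names.extend(item.split('_')) # Split into individual components
--
--     model_names = list(set(model_names)) # Create a unique list
--     model_names.sort() # Sort into order (numbers first)
--     model_names = model_names[-3:] # Get only model names
--     return model_names
-- ===== SOURCE B (Python) =====
-- def get_model_names(model_paths):
--     # Collect the unique components in one set-building pass.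
--     seen = set()
--     for item in model_paths:
--         seen.update(item.split('_'))
--     # Single-pass top-3 selection: keep (at most) the 3 largest seen so far,
--     # in ascending order, instead of sorting everything and slicing.
--     top = []
--     for s in seen:
--         i = 0
--         while i < len(top) and top[i] < s:
--             i += 1
--         top.insert(i, s)
--         if len(top) > 3:
--             top.pop(0)
--     return top
-- ===== Notes on version B (the rewrite author's own statement) =====
-- stated objective: alternative
-- what changed: B builds the unique-component set incrementally (set.update per path) and replaces A's full sort + [-3:] slice by a single-pass top-3 selection that keeps only the three largest components in ascending order.
import Mathlib
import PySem

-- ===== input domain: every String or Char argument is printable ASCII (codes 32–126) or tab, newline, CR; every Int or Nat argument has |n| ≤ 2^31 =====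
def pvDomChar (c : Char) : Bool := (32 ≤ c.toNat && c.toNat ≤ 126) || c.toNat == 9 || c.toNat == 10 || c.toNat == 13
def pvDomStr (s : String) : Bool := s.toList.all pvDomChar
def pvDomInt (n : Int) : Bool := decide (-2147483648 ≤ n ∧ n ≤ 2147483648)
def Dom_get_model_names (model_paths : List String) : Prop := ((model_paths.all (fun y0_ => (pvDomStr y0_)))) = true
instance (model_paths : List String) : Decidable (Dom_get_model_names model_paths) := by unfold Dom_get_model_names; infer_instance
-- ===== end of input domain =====

-- B replaces A's full sort + slice by a single-pass top-3 selection over the component set (alternative decomposition; not claimed faster).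


-- ===== PORT A =====
-- item.split('_') with the fixed non-empty separator "_": split? is never none here
def pvSplitU (item : String) : List String := (PySem.Str.split? item "_").getD []

def get_model_names (model_paths : List String) : List String :=
  -- for item in model_paths: model_names.extend(item.split('_'))
  let model_names := model_paths.foldl (fun acc item => acc ++ pvSplitU item) []
  -- model_names = list(set(model_names)); model_names.sort()
  let uniq := PySem.Set.ofList model_names
  let srt := PySem.List.sorted uniq (fun x => x) false
  -- model_names[-3:]
  PySem.List.slice srt (some (-3)) none

-- ===== PORT B =====
-- the inner while/insert: put s before the first element not smaller than it
def gmnIns : List String → String → List String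
  | [], s => [s]
  | t :: ts, s => if t < s then t :: gmnIns ts s else s :: t :: ts

-- one iteration of B's selection loop: insert, then pop the front if more than 3
def gmnStep (top : List String) (s : String) : List String :=
  let t := gmnIns top s
  if 3 < t.length then t.tail else t

def get_model_names_alt (model_paths : List String) : List String :=
  let seen := model_paths.foldl (fun s item => PySem.Set.update s (pvSplitU item)) PySem.Set.empty
  seen.foldl gmnStep []

-- ===== PRECONDITION & SPEC =====
def Spec_get_model_names (model_paths : List String) (out : List String) : Prop := out = get_model_names_alt model_paths
instance (model_paths : List String) (out : List String) : Decidable (Spec_get_model_names model_paths out) := by unfold Spec_get_model_names; infer_instance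

-- ===== CLAIM (what is proved, stated in full; the proofs are below) =====
def Claim_equal_get_model_names : Prop := ∀ (model_paths : List String), Dom_get_model_names model_paths → Spec_get_model_names model_paths (get_model_names model_paths)

-- ===== LEMMAS AND PROOFS =====

-- building the set incrementally (B) = the set of the concatenation (A)
theorem gmn_set_eq (paths : List String) (xs : List String) :
    paths.foldl (fun s item => PySem.Set.update s (pvSplitU item)) (PySem.Set.ofList xs)
      = PySem.Set.ofList (paths.foldl (fun acc item => acc ++ pvSplitU item) xs) := by
  induction paths generalizing xs with
  | nil => rfl
  | cons p ps ih =>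
      simp only [List.foldl_cons, ← PySem.Set.ofList_append, ih]

theorem gmnIns_eq_insertBy (s : List String) (x : String) (hx : x ∉ s) :
    gmnIns s x = PySem.List.insertBy (fun a b => decide (a < b)) x s := by
  induction s with
  | nil => simp [gmnIns, PySem.List.insertBy]
  | cons t ts ih =>
      have hne : x ≠ t := by intro h; exact hx (h ▸ List.mem_cons_self)
      have hx' : x ∉ ts := fun h => hx (List.mem_cons_of_mem _ h)
      simp only [gmnIns, PySem.List.insertBy]
      rcases lt_or_gt_of_ne hne with h | h
      · simp [h, not_lt_of_gt h]
      · simp [h, not_lt_of_gt h, ih hx']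
theorem insertBy_append_of_before (before : String → String → Bool) (x b0 : String)
    (a bs : List String) (h : before x b0 = true) :
    PySem.List.insertBy before x (a ++ b0 :: bs)
      = PySem.List.insertBy before x a ++ b0 :: bs := by
  induction a with
  | nil => simp [PySem.List.insertBy, h]
  | cons y ys ih =>
      simp only [List.cons_append, PySem.List.insertBy]
      split <;> simp [ih]
theorem insertBy_append_of_not_before (before : String → String → Bool) (x : String)
    (a b : List String) (h : ∀ y ∈ a, before x y = false) :
    PySem.List.insertBy before x (a ++ b)
      = a ++ PySem.List.insertBy before x b := by
  induction a with
  | nil => simp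
  | cons y ys ih =>
      simp only [List.cons_append, PySem.List.insertBy]
      have := h y List.mem_cons_self
      simp [this, ih (fun z hz => h z (List.mem_cons_of_mem _ hz))]

theorem length_insertBy (before : String → String → Bool) (x : String) (s : List String) :
    (PySem.List.insertBy before x s).length = s.length + 1 := by
  induction s with
  | nil => simp [PySem.List.insertBy]
  | cons t ts ih => simp only [PySem.List.insertBy]; split <;> simp [ih]

theorem gmn_step_window (s : List String) (x : String)
    (hp : s.Pairwise (· < ·)) (hx : x ∉ s) :
    gmnStep (s.drop (s.length - 3)) x
      = (PySem.List.insertBy (fun a b => decide (a < b)) x s).drop (s.length + 1 - 3) := by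
  by_cases h3 : s.length < 3
  · have h0 : s.length - 3 = 0 := by omega
    have h0' : s.length + 1 - 3 = 0 := by omega
    rw [h0, h0', List.drop_zero, List.drop_zero]
    unfold gmnStep
    rw [gmnIns_eq_insertBy s x hx]
    have := length_insertBy (fun a b => decide (a < b)) x s
    simp only []
    rw [if_neg (by omega)]
  · -- s.length ≥ 3
    set k := s.length - 3 with hk
    have hs : s = s.take k ++ s.drop k := (List.take_append_drop k s).symm
    set a := s.take k with ha
    set b := s.drop k with hb
    have hlena : a.length = k := by rw [ha, List.length_take]; omega
    have hlenb : b.length = 3 := by rw [hb, List.length_drop]; omega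
    obtain ⟨b0, b1, b2, hbc'⟩ := List.length_eq_three.mp hlenb
    obtain ⟨bt, hbc⟩ : ∃ bt, b = b0 :: bt := ⟨[b1, b2], hbc'⟩
    have hxb : x ∉ b := fun h => hx (hs ▸ List.mem_append_right _ h)
    have hins : gmnIns b x = PySem.List.insertBy (fun a b => decide (a < b)) x b :=
      gmnIns_eq_insertBy b x hxb
    have hpw := hs ▸ hp
    rw [List.pairwise_append] at hpw
    have hlb : (PySem.List.insertBy (fun a b => decide (a < b)) x b).length = 4 := by
      rw [length_insertBy, hlenb]
    have hLHS : gmnStep b x = (PySem.List.insertBy (fun a b => decide (a < b)) x b).drop 1 := by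
      unfold gmnStep
      rw [hins]
      simp only []
      rw [if_pos (by omega), List.drop_one]
    rw [hLHS]
    by_cases hcmp : x < b0
    · -- x goes before the window head: insertBy x b = x :: b, drop 1 = b
      have h1 : PySem.List.insertBy (fun a b => decide (a < b)) x b = x :: b := by
        rw [hbc]; simp [PySem.List.insertBy, hcmp]
      rw [h1]
      conv_rhs => rw [hs, hbc]
      rw [insertBy_append_of_before _ _ _ _ _ (by simp [hcmp])]
      rw [List.drop_append, length_insertBy, hlena]
      have e1 : (a ++ b0 :: bt).length + 1 - 3 = k + 1 := by
        rw [List.length_append, ← hbc, hlena, hlenb]; omega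
      rw [e1]
      have h2 : List.drop (k+1) (PySem.List.insertBy (fun a b => decide (a < b)) x a) = [] := by
        apply List.drop_eq_nil_of_le; rw [length_insertBy, hlena]
      rw [h2]
      simp [← hbc]
    · -- x goes after the window head
      have hxb0 : b0 ∈ b := by rw [hbc]; exact List.mem_cons_self
      have hne : x ≠ b0 := fun h => hxb (h ▸ hxb0)
      have hb0x : b0 < x := lt_of_le_of_ne (not_lt.mp hcmp) (fun h => hne h.symm)
      have hbefore : ∀ y ∈ a, (fun a b => decide (a < b)) x y = false := by
        intro y hy
        have : y < b0 := hpw.2.2 y hy b0 hxb0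
        simp [not_lt_of_gt (lt_trans this hb0x)]
      conv_rhs => rw [hs]
      rw [insertBy_append_of_not_before _ _ _ _ hbefore]
      rw [List.drop_append, hlena]
      have e1 : (a ++ b).length + 1 - 3 = k + 1 := by
        rw [List.length_append, hlena, hlenb]; omega
      rw [e1]
      have : List.drop (k+1) a = [] := by
        apply List.drop_eq_nil_of_le; omega
      rw [this]
      simp

theorem gmn_fold_window (u : List String) (p : List String) (h : (p ++ u).Nodup) :
    u.foldl gmnStep
        ((PySem.List.sorted p (fun x => x) false).drop
          ((PySem.List.sorted p (fun x => x) false).length - 3))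
      = (PySem.List.sorted (p ++ u) (fun x => x) false).drop
          ((PySem.List.sorted (p ++ u) (fun x => x) false).length - 3) := by
  induction u generalizing p with
  | nil => simp
  | cons x us ih =>
      have hassoc : p ++ x :: us = (p ++ [x]) ++ us := by simp
      have hp : p.Nodup := (List.nodup_append.mp h).1
      have hxp : x ∉ p := by
        have hd := (List.nodup_append.mp h).2.2
        exact fun hm => (hd x hm x List.mem_cons_self) rfl
      have hsp : (PySem.List.sorted p (fun x => x) false).Pairwise (· < ·) := by
        have := PySem.List.sorted_ofList_pairwise_lt p
        rwa [PySem.Set.ofList_eq_self_of_nodup p hp] at this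
      have hxs : x ∉ PySem.List.sorted p (fun x => x) false := by
        rw [PySem.List.mem_sorted]; exact hxp
      have hstep := gmn_step_window (PySem.List.sorted p (fun x => x) false) x hsp hxs
      have hsortapp : PySem.List.insertBy (fun a b => decide (a < b)) x
            (PySem.List.sorted p (fun x => x) false)
          = PySem.List.sorted (p ++ [x]) (fun x => x) false := by
        rw [PySem.List.sorted_eq_foldl_insertBy p, PySem.List.sorted_eq_foldl_insertBy (p ++ [x])]
        rw [List.foldl_append]
        rfl
      have hlen : (PySem.List.sorted p (fun x => x) false).length + 1
          = (PySem.List.sorted (p ++ [x]) (fun x => x) false).length := by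
        rw [PySem.List.length_sorted, PySem.List.length_sorted]; simp
      rw [List.foldl_cons, hstep, hsortapp, hlen]
      have h' : ((p ++ [x]) ++ us).Nodup := by rwa [← hassoc]
      have := ih (p ++ [x]) h'
      rw [this, hassoc]

theorem get_model_names_main (model_paths : List String) :
    get_model_names model_paths = get_model_names_alt model_paths := by
  unfold get_model_names get_model_names_alt
  simp only []
  rw [show (PySem.Set.empty : PySem.Set String) = PySem.Set.ofList [] from rfl, gmn_set_eq]
  set flat := model_paths.foldl (fun acc item => acc ++ pvSplitU item) [] with hflat
  have hfold := gmn_fold_window (PySem.Set.ofList flat) [] (by simp)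
  have h0 : (PySem.List.sorted ([] : List String) (fun x => x) false) = [] := by
    rw [PySem.List.sorted_eq_nil_iff]
  rw [h0] at hfold
  simp only [List.drop_nil, List.nil_append] at hfold
  rw [PySem.List.slice_from_neg_ofNat _ 3 (by omega), hfold]

-- ===== VERDICT (by name: the statement is the Claim_ definition above) =====
theorem get_model_names_spec : Claim_equal_get_model_names := by
  intro model_paths _
  exact get_model_names_main model_paths
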